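-- pv_equiv track=rewrite | github.com/nathanroark/advent-of-code | src/2025/day-06/python/part_2a.py | Part2
-- ===== SOURCE A (Python) =====
-- def Part2(input):
--     # Step 1: Parse input into grid
--     # -----------------------------------------
--     grid = []
--     lines = input.splitlines()
--     n = len(lines)
--     m = len(lines[0])
--
--     for c in range(m):
--         if c >= len(grid):
--             grid.append([])
--         for r in range(n):
--             char = lines[r][c]
--             if char.isdigit():
--                 grid[c].append(int(char))
--             else:
--                 grid[c].append(char)
--
--     # Step 2: Combine digits into numbers
--     # -----------------------------------------
--     for r in range(len(grid)):
--         new_row = []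
--         current_number = ""
--         for item in grid[r]:
--             if isinstance(item, int):
--                 current_number += str(item)
--             else:
--                 if current_number:
--                     new_row.append(int(current_number))
--                     current_number = ""
--                 new_row.append(item)
--         if current_number:
--             new_row.append(int(current_number))
--         grid[r] = new_row
--
--     # Step 3: Clean up grid
--     # -----------------------------------------
--     # Step 3a: Remove spaces
--     # -----------------------------------
--     cleaned_grid = []
--     for row in grid:
--         cleaned_row = [item for item in row if item != " "]
--         if cleaned_row:
--             cleaned_grid.append(cleaned_row)
--
--     # Step 3b: Move operators to front
--     # -----------------------------------
--     for i in range(len(cleaned_grid)):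
--         row = cleaned_grid[i]
--         if row and isinstance(row[-1], str):
--             operator = row.pop()
--             row.insert(0, operator)
--
--     # Step 4: Evaluate - Fixed logic
--     # -----------------------------------------
--     result_sum = 0
--     current_operation = None
--     current_result = None
--
--     for row in cleaned_grid:
--         for item in row:
--             if isinstance(item, str):
--                 # New operator found - save previous result
--                 if current_result is not None:
--                     result_sum += current_result
--                     current_result = None
--                 current_operation = item
--             else:
--                 # Process number
--                 if current_result is None:
--                     current_result = item
--                 else:
--                     if current_operation == "*":
--                         current_result *= item
--                     elif current_operation == "+":
--                         current_result += item
--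
--     # Add final result
--     if current_result is not None:
--         result_sum += current_result
--
--     return result_sum
-- ===== SOURCE B (Python) =====
-- def Part2(input):
--     # One fused pass per column: lex the column string into tokens
--     # (digit runs -> ints, spaces dropped, other chars kept), rotate a
--     # trailing operator to the front, then evaluate the flat token stream
--     # group by group (one operator + its following numbers).
--     lines = input.splitlines()
--     m = len(lines[0])
--
--     def lex(col):
--         toks = []
--         i = 0
--         while i < len(col):
--             c = col[i]
--             if c.isdigit():
--                 j = i
--                 while j < len(col) and col[j].isdigit():
--                     j += 1
--                 toks.append(int(col[i:j]))
--                 i = j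
--             elif c == " ":
--                 i += 1
--             else:
--                 toks.append(c)
--                 i += 1
--         return toks
--
--     tokens = []
--     for c in range(m):
--         toks = lex("".join(line[c] for line in lines))
--         if toks and isinstance(toks[-1], str):
--             toks = [toks[-1]] + toks[:-1]
--         tokens += toks
--
--     def group_value(op, nums):
--         if not nums:
--             return 0
--         acc = nums[0]
--         for x in nums[1:]:
--             if op == "*":
--                 acc *= x
--             elif op == "+":
--                 acc += x
--         return acc
--
--     # leading numbers (before any operator): only the first one counts
--     k = 0
--     while k < len(tokens) and not isinstance(tokens[k], str):
--         k += 1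
--     total = tokens[0] if k > 0 else 0
--
--     # each group: one operator followed by its numbers
--     while k < len(tokens):
--         op = tokens[k]
--         j = k + 1
--         while j < len(tokens) and not isinstance(tokens[j], str):
--             j += 1
--         total += group_value(op, tokens[k + 1 : j])
--         k = j
--     return total
-- ===== Notes on version B (the rewrite author's own statement) =====
-- stated objective: alternative
-- what changed: B fuses A's three grid passes (transpose to columns, digit-combine, space/empty cleanup) into a single per-column lexer and replaces A's stateful accumulator evaluation by segmenting the flat token stream into operator-led groups, folding each group and summing the group totals.
import Mathlib
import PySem

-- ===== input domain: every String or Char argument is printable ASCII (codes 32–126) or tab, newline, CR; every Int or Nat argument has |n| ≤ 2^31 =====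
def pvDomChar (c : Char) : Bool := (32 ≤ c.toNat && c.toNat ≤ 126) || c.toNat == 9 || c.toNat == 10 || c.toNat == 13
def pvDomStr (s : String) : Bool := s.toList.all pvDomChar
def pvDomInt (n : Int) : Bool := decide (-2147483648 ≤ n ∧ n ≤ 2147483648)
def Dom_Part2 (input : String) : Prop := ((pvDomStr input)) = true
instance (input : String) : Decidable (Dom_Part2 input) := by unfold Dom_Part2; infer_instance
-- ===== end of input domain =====

-- B fuses A's transpose/digit-combine/cleanup passes into one per-column lexer and evaluates
-- the flat token stream group by group (one operator plus its numbers) instead of A's single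
-- stateful accumulator pass; objective: alternative decomposition, same values.

-- Grid items: an int token or a character token (Python's int-or-str list elements).
inductive PvItem : Type
  | int : Int → PvItem
  | str : Char → PvItem
deriving DecidableEq, Repr

-- ===== PORT A =====

-- int(s) on a digit string, as both versions use it (always succeeds on the strings they build)
def paVal (cs : List Char) : Int := (PySem.Int.ofChars? cs).getD 0

-- step 1 body: one character of a column → an item
def paConv (ch : Char) : PvItem :=
  if PySem.Chars.isdigit ch then PvItem.int (paVal [ch]) else PvItem.str ch

-- step 2 loop body: state (new_row, current_number)
def paCombineStep (p : List PvItem × List Char) (item : PvItem) : List PvItem × List Char :=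
  match item with
  | PvItem.int d => (p.1, p.2 ++ PySem.Int.toChars d)
  | PvItem.str c =>
      ((if p.2 ≠ [] then p.1 ++ [PvItem.int (paVal p.2)] else p.1) ++ [PvItem.str c], [])

-- step 2 on one row, including the trailing flush
def paCombineRow (row : List PvItem) : List PvItem :=
  let p := row.foldl paCombineStep ([], [])
  if p.2 ≠ [] then p.1 ++ [PvItem.int (paVal p.2)] else p.1

-- step 3b: move a trailing operator to the front
def paRotate (row : List PvItem) : List PvItem :=
  match row.getLast? with
  | some (PvItem.str c) => PvItem.str c :: row.dropLast
  | _ => row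

-- step 4 loop body: state (result_sum, current_operation, current_result)
def paEvalStep (st : Int × Option Char × Option Int) (item : PvItem) :
    Int × Option Char × Option Int :=
  match item with
  | PvItem.str c =>
      (match st.2.2 with
       | some r => (st.1 + r, some c, none)
       | none => (st.1, some c, none))
  | PvItem.int x =>
      (match st.2.2 with
       | none => (st.1, st.2.1, some x)
       | some r =>
           if st.2.1 = some '*' then (st.1, st.2.1, some (r * x))
           else if st.2.1 = some '+' then (st.1, st.2.1, some (r + x))
           else st)

def Part2 (input : String) : Int :=
  -- step 1: parse into a column-major grid
  let lines := PySem.Chars.splitlines input.toList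
  let n := PySem.List.len lines
  let m := PySem.List.len (PySem.List.pyGetD lines 0 [])   -- len(lines[0]); Pre_ keeps lines ≠ []
  let grid : List (List PvItem) :=
    (PySem.List.pyRange 0 (PySem.List.len (PySem.List.pyGetD lines 0 []))).foldl (fun grid c =>
      grid ++ [(PySem.List.pyRange 0 n).foldl (fun row r =>
        row ++ [paConv (PySem.List.pyGetD (PySem.List.pyGetD lines r []) c ' ')]) []]) []
  -- step 2: combine digits into numbers
  let grid2 := grid.map paCombineRow
  -- step 3a: remove spaces, drop empty rows
  let cleaned := (grid2.map (List.filter (fun it => it ≠ PvItem.str ' '))).filter (· ≠ [])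
  -- step 3b: operators to the front
  let cleaned2 := cleaned.map paRotate
  -- step 4: evaluate
  let st := cleaned2.foldl (fun st row => row.foldl paEvalStep st) (0, none, none)
  match st.2.2 with
  | some r => st.1 + r
  | none => st.1

-- ===== PORT B =====

def pbIsNum : PvItem → Bool
  | PvItem.int _ => true
  | PvItem.str _ => false

-- column lexer: digit runs → ints, spaces dropped, other chars kept
def pbLex : List Char → List PvItem
  | [] => []
  | c :: cs =>
    if PySem.Chars.isdigit c then
      PvItem.int (paVal (List.takeWhile PySem.Chars.isdigit (c :: cs)))
        :: pbLex (List.dropWhile PySem.Chars.isdigit (c :: cs))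
    else if c = ' ' then pbLex cs
    else PvItem.str c :: pbLex cs
termination_by cs => cs.length
decreasing_by
  · simp only [List.dropWhile_cons, *]
    simpa using Nat.lt_succ_of_le (List.length_dropWhile_le _ _)
  · simp
  · simp

-- one group: its operator applied left to right over its numbers (first number as seed)
def pbGroupVal (op : Char) (nums : List PvItem) : Int :=
  match nums with
  | [] => 0
  | PvItem.int n :: rest =>
      rest.foldl (fun acc it =>
        match it with
        | PvItem.int x => if op = '*' then acc * x else if op = '+' then acc + x else acc
        | PvItem.str _ => acc) n
  | PvItem.str _ :: _ => 0   -- callers only pass number tokens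

-- sum of the group values of a stream that starts with an operator (or is empty)
def pbGroups : List PvItem → Int
  | [] => 0
  | PvItem.str c :: rest =>
      pbGroupVal c (rest.takeWhile pbIsNum) + pbGroups (rest.dropWhile pbIsNum)
  | PvItem.int _ :: rest => pbGroups rest   -- callers never start a group with a number
termination_by ts => ts.length
decreasing_by
  · simpa using Nat.lt_succ_of_le (List.length_dropWhile_le _ _)
  · simp

def Part2_alt (input : String) : Int :=
  let lines := PySem.Chars.splitlines input.toList
  let m := PySem.List.len (PySem.List.pyGetD lines 0 [])
  let tokens :=
    (PySem.List.pyRange 0 (PySem.List.len (PySem.List.pyGetD lines 0 []))).foldl (fun acc c =>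
      let toks := pbLex (lines.map (fun line => PySem.List.pyGetD line c ' '))
      let toks :=
        match toks.getLast? with
        | some (PvItem.str ch) => PvItem.str ch :: toks.dropLast
        | _ => toks
      acc ++ toks) []
  -- leading numbers (before any operator): only the first one counts
  (match tokens.takeWhile pbIsNum with
   | PvItem.int n :: _ => n
   | _ => 0) + pbGroups (tokens.dropWhile pbIsNum)

-- ===== PRECONDITION & SPEC =====
-- Pre_ excludes exactly the inputs where Python A raises IndexError: no lines at all, or a
-- line shorter than the first line (lines[r][c] out of range).
def Pre_Part2 (input : String) : Prop :=
  let lines := PySem.Chars.splitlines input.toList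
  lines ≠ [] ∧ ∀ l ∈ lines, (lines.headD []).length ≤ l.length
instance (input : String) : Decidable (Pre_Part2 input) := by unfold Pre_Part2; infer_instance

def pvWitness_Part2 : String := "12*\n34 "

def Spec_Part2 (input : String) (out : Int) : Prop := out = Part2_alt input
instance (input : String) (out : Int) : Decidable (Spec_Part2 input out) := by
  unfold Spec_Part2; infer_instance

-- ===== CLAIM (what is proved, stated in full; the proofs are below) =====
def Claim_equal_Part2 : Prop :=
  ∀ (input : String), Dom_Part2 input → Pre_Part2 input → Spec_Part2 input (Part2 input)

-- ===== LEMMAS AND PROOFS =====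

-- A's final flush of current_result into result_sum
def pvFinish (st : Int × Option Char × Option Int) : Int :=
  match st.2.2 with
  | some r => st.1 + r
  | none => st.1

-- A's step-3a space filter
def pvClean (row : List PvItem) : List PvItem := row.filter (fun it => it ≠ PvItem.str ' ')

-- B's lexer with a pending digit prefix (the generalised accumulator of A's step 2)
def pbLexP (cur cs : List Char) : List PvItem :=
  if cur = [] then pbLex cs
  else PvItem.int (paVal (cur ++ cs.takeWhile PySem.Chars.isdigit))
         :: pbLex (cs.dropWhile PySem.Chars.isdigit)

theorem pbLex_cons (c : Char) (cs : List Char) :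
    pbLex (c :: cs) =
      (if PySem.Chars.isdigit c then
        PvItem.int (paVal (List.takeWhile PySem.Chars.isdigit (c :: cs)))
          :: pbLex (List.dropWhile PySem.Chars.isdigit (c :: cs))
      else if c = ' ' then pbLex cs
      else PvItem.str c :: pbLex cs) := by
  rw [pbLex]

theorem pbGroups_cons_str (c : Char) (rest : List PvItem) :
    pbGroups (PvItem.str c :: rest) =
      pbGroupVal c (rest.takeWhile pbIsNum) + pbGroups (rest.dropWhile pbIsNum) := by
  rw [pbGroups]

-- str(int(c)) = c for a digit character
theorem pv_digit_roundtrip (c : Char) (h : PySem.Chars.isdigit c = true) :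
    PySem.Int.toChars (paVal [c]) = [c] := by
  have hv : 48 ≤ c.toNat ∧ c.toNat ≤ 57 := by
    simp only [PySem.Chars.isdigit, Bool.and_eq_true, decide_eq_true_eq, Char.le_def] at h
    exact ⟨h.1, h.2⟩
  have hc : c = Char.ofNat c.toNat := (Char.ofNat_toNat c).symm
  rw [hc]
  obtain ⟨h1, h2⟩ := hv
  interval_cases (c.toNat) <;> decide

-- A's steps 2 + 3a on one column equal B's lexer (generalised over A's accumulator)
theorem pv_row_aux (cs : List Char) : ∀ (acc : List PvItem) (cur : List Char),
    pvClean (let p := (cs.map paConv).foldl paCombineStep (acc, cur);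
             if p.2 ≠ [] then p.1 ++ [PvItem.int (paVal p.2)] else p.1)
      = pvClean acc ++ pbLexP cur cs := by
  induction cs with
  | nil =>
    intro acc cur
    by_cases h : cur = [] <;>
      simp [h, pbLexP, pbLex, pvClean, List.filter_append]
  | cons c cs ih =>
    intro acc cur
    by_cases hd : PySem.Chars.isdigit c = true
    · simp only [List.map_cons, List.foldl_cons, paConv, hd, if_pos, paCombineStep,
        pv_digit_roundtrip c hd]
      rw [ih acc (cur ++ [c])]
      by_cases h : cur = []
      · simp [h, pbLexP, pbLex, hd]
      · have : ¬ (cur ++ [c] = []) := by simp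
        simp [pbLexP, h, this, List.takeWhile_cons, hd, List.dropWhile_cons]
    · simp only [List.map_cons, List.foldl_cons, paConv, hd, if_neg, Bool.false_eq_true,
        not_false_iff, ite_false, paCombineStep]
      rw [ih _ []]
      by_cases h : cur = [] <;> by_cases hsp : c = ' ' <;>
        simp [pbLexP, pbLex_cons, h, hsp, hd, pvClean, List.filter_append,
          (by decide : PySem.Chars.isdigit ' ' = false)]

theorem pv_row (cs : List Char) :
    pvClean (paCombineRow (cs.map paConv)) = pbLex cs := by
  have := pv_row_aux cs [] []
  simpa [paCombineRow, pbLexP, pvClean] using this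

-- dropping empty rows before rotating does not change the flattened stream
theorem pv_flatten_filter (L : List (List PvItem)) :
    ((L.filter (· ≠ [])).map paRotate).flatten = (L.map paRotate).flatten := by
  induction L with
  | nil => rfl
  | cons row L ih =>
    rw [List.filter_cons]
    by_cases h : row = []
    · rw [if_neg (by simp [h]), ih, List.map_cons, List.flatten_cons, h]
      rfl
    · rw [if_pos (by simp [h]), List.map_cons, List.map_cons, List.flatten_cons,
        List.flatten_cons, ih]

-- the state-machine ↔ group-decomposition invariants
theorem pv_eval_inv (ts : List PvItem) :
    (∀ s c r, pvFinish (ts.foldl paEvalStep (s, some c, some r)) =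
        s + (ts.takeWhile pbIsNum).foldl (fun acc it =>
              match it with
              | PvItem.int x => if c = '*' then acc * x else if c = '+' then acc + x else acc
              | PvItem.str _ => acc) r
          + pbGroups (ts.dropWhile pbIsNum)) ∧
    (∀ s c, pvFinish (ts.foldl paEvalStep (s, some c, none)) =
        s + pbGroupVal c (ts.takeWhile pbIsNum) + pbGroups (ts.dropWhile pbIsNum)) ∧
    (∀ s r, pvFinish (ts.foldl paEvalStep (s, none, some r)) =
        s + r + pbGroups (ts.dropWhile pbIsNum)) := by
  induction ts with
  | nil => refine ⟨?_, ?_, ?_⟩ <;> intros <;> simp [pvFinish, pbGroups, pbGroupVal]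
  | cons t ts ih =>
    obtain ⟨ih1, ih2, ih3⟩ := ih
    refine ⟨?_, ?_, ?_⟩
    · intro s c r
      cases t with
      | int x =>
        simp only [List.foldl_cons, paEvalStep, List.takeWhile_cons, List.dropWhile_cons,
          pbIsNum]
        by_cases hc : c = '*'
        · simp [hc, ih1]
        · by_cases hc2 : c = '+'
          · simp [hc, hc2, ih1]
          · simp [hc, hc2, ih1]
      | str d =>
        simp only [List.foldl_cons, paEvalStep, List.takeWhile_cons, List.dropWhile_cons,
          pbIsNum, ih2]
        simp [pbGroups]
        ring
    · intro s c
      cases t with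
      | int x =>
        simp only [List.foldl_cons, paEvalStep, List.takeWhile_cons, List.dropWhile_cons,
          pbIsNum, ih1]
        simp [pbGroupVal]
      | str d =>
        simp only [List.foldl_cons, paEvalStep, List.takeWhile_cons, List.dropWhile_cons,
          pbIsNum, ih2]
        simp [pbGroups, pbGroupVal]
        ring
    · intro s r
      cases t with
      | int x =>
        simp only [List.foldl_cons, paEvalStep, List.dropWhile_cons, pbIsNum]
        exact ih3 s r
      | str d =>
        simp only [List.foldl_cons, paEvalStep, List.dropWhile_cons, pbIsNum, ih2]
        simp [pbGroups]
        ring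

-- A's whole step 4 equals B's group evaluation
theorem pv_eval_top (ts : List PvItem) :
    pvFinish (ts.foldl paEvalStep (0, none, none)) =
      (match ts.takeWhile pbIsNum with
       | PvItem.int n :: _ => n
       | _ => 0) + pbGroups (ts.dropWhile pbIsNum) := by
  cases ts with
  | nil => simp [pvFinish, pbGroups]
  | cons t ts =>
    cases t with
    | int x =>
      simp only [List.foldl_cons, paEvalStep, List.takeWhile_cons, List.dropWhile_cons, pbIsNum]
      have := (pv_eval_inv ts).2.2 0 x
      simpa using this
    | str d =>
      simp only [List.foldl_cons, paEvalStep, List.takeWhile_cons, List.dropWhile_cons, pbIsNum]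
      have := (pv_eval_inv ts).2.1 0 d
      rw [this]
      simp only [Bool.false_eq_true, if_false, pbGroups_cons_str]
      ring

-- ===== VERDICT (by name: the statement is the Claim_ definition above) =====
theorem Part2_spec : Claim_equal_Part2 := by
  intro input _ _
  unfold Spec_Part2 Part2 Part2_alt
  set lines := PySem.Chars.splitlines input.toList with hlines
  have hmap := PySem.List.map_pyGetD_pyRange_zero lines ([] : List Char)
  have hcol : ∀ c : Int,
      (PySem.List.pyRange 0 (PySem.List.len lines)).map
        (fun r => paConv (PySem.List.pyGetD (PySem.List.pyGetD lines r []) c ' '))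
      = ((lines.map (fun line => PySem.List.pyGetD line c ' ')).map paConv) := by
    intro c
    conv_rhs => rw [← hmap, List.map_map, List.map_map]
    rfl
  -- A's nested append-loops are maps
  simp only [PySem.List.foldl_append_singleton_eq_map, List.nil_append]
  simp only [hcol]
  -- A's steps 2+3a on a column are B's lexer
  simp only [List.map_map, Function.comp_def]
  have hrow : ∀ c : Int,
      List.filter (fun it => decide (it ≠ PvItem.str ' '))
        (paCombineRow (List.map (fun line => paConv (PySem.List.pyGetD line c ' ')) lines))
      = pbLex (List.map (fun line => PySem.List.pyGetD line c ' ') lines) := by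
    intro c
    have h := pv_row (List.map (fun line => PySem.List.pyGetD line c ' ') lines)
    simpa [pvClean, List.map_map, Function.comp_def] using h
  simp only [hrow]
  -- A's step 4 is a fold over the flattened stream
  rw [← List.foldl_flatten]
  rw [show (match (List.foldl paEvalStep (0, none, none)
        ((List.map paRotate (List.filter (fun x => decide (x ≠ []))
          (List.map (fun c => pbLex (lines.map (fun line => PySem.List.pyGetD line c ' ')))
            (PySem.List.pyRange 0 (PySem.List.len (PySem.List.pyGetD lines 0 [])))))).flatten)).2.2 with
      | some r => (List.foldl paEvalStep (0, none, none)
        ((List.map paRotate (List.filter (fun x => decide (x ≠ []))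
          (List.map (fun c => pbLex (lines.map (fun line => PySem.List.pyGetD line c ' ')))
            (PySem.List.pyRange 0 (PySem.List.len (PySem.List.pyGetD lines 0 [])))))).flatten)).1 + r
      | none => (List.foldl paEvalStep (0, none, none)
        ((List.map paRotate (List.filter (fun x => decide (x ≠ []))
          (List.map (fun c => pbLex (lines.map (fun line => PySem.List.pyGetD line c ' ')))
            (PySem.List.pyRange 0 (PySem.List.len (PySem.List.pyGetD lines 0 [])))))).flatten)).1)
      = pvFinish (List.foldl paEvalStep (0, none, none)
        ((List.map paRotate (List.filter (fun x => decide (x ≠ []))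
          (List.map (fun c => pbLex (lines.map (fun line => PySem.List.pyGetD line c ' ')))
            (PySem.List.pyRange 0 (PySem.List.len (PySem.List.pyGetD lines 0 [])))))).flatten)) from rfl]
  rw [pv_eval_top]
  -- dropping the empty rows does not change the stream
  rw [pv_flatten_filter]
  -- B's append-loop is the same flattened stream
  simp only [PySem.List.foldl_append_eq_flatMap, List.nil_append, List.flatMap_def,
    List.map_map, Function.comp_def]
  rw [show (fun c => match (pbLex (lines.map (fun line => PySem.List.pyGetD line c ' '))).getLast? with
        | some (PvItem.str ch) =>
            PvItem.str ch :: (pbLex (lines.map (fun line => PySem.List.pyGetD line c ' '))).dropLast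
        | _ => pbLex (lines.map (fun line => PySem.List.pyGetD line c ' ')))
      = (fun c : Int => paRotate (pbLex (lines.map (fun line => PySem.List.pyGetD line c ' '))))
      from rfl]
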